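-- pv_equiv track=rewrite | github.com/ratishsp/data2text-macro-plan-py | scripts/convert_roto_plan.py | number_segment
-- ===== SOURCE A (Python) =====
-- def number_segment(toks):
--     outer_list = []
--     sublist = []
--     segment_index = 0
--     for tok in toks:
--         if tok == "<segment>":
--             if sublist:
--                 outer_list.append(" ".join(sublist))
--             sublist = ["<segment" + str(segment_index) + ">"]  # add segment id
--             segment_index += 1
--         elif tok == "</s>":
--             continue
--         else:
--             sublist.append(tok)
--     outer_list.append(" ".join(sublist))
--     return " ".join(outer_list)
-- ===== SOURCE B (Python) =====
-- def number_segment(toks):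
--     kept = [t for t in toks if t != "</s>"]
--     groups = [[]]
--     for t in kept:
--         if t == "<segment>":
--             groups.append([])
--         else:
--             groups[-1].append(t)
--     parts = [" ".join(["<segment" + str(i) + ">"] + g) for i, g in enumerate(groups[1:])]
--     if groups[0]:
--         parts = [" ".join(groups[0])] + parts
--     return " ".join(parts)
-- ===== Notes on version B (the rewrite author's own statement) =====
-- stated objective: simpler
-- what changed: A interleaves flushing, numbering and joining inside one stateful loop; B first filters out '</s>', splits the tokens into marker-delimited groups, then renders the numbered groups declaratively with enumerate and joins, dropping only an empty leading group.
import Mathlib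
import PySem

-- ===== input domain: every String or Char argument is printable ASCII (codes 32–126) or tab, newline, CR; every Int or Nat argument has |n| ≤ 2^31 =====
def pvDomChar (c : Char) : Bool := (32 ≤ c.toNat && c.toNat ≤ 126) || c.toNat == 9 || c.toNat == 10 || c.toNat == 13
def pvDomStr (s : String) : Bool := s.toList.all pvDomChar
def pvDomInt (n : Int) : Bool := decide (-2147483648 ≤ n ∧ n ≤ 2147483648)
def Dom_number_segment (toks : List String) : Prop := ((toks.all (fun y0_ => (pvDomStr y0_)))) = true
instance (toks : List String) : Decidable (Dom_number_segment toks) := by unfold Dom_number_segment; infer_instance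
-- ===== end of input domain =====

-- B re-decomposes A's single stateful loop as filter → split-into-groups → number-and-join (simpler); same return value, no side effects.

-- ===== PORT A =====
-- loop body of A (state: outer_list, sublist, segment_index)
def stepA (st : List String × List String × Int) (tok : String) : List String × List String × Int :=
  if tok == "<segment>" then
    let outer := if st.2.1.isEmpty then st.1 else st.1 ++ [PySem.Str.join " " st.2.1]
    (outer, ["<segment" ++ PySem.Int.toStr st.2.2 ++ ">"], st.2.2 + 1)
  else if tok == "</s>" then st
  else (st.1, st.2.1 ++ [tok], st.2.2)

def number_segment (toks : List String) : String :=
  let st := toks.foldl stepA ([], [], 0)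
  PySem.Str.join " " (st.1 ++ [PySem.Str.join " " st.2.1])

-- ===== PORT B =====
-- split step of B: finished groups so far, current (last) group
def stepB (gp : List (List String) × List String) (t : String) : List (List String) × List String :=
  if t == "<segment>" then (gp.1 ++ [gp.2], []) else (gp.1, gp.2 ++ [t])

def number_segment_alt (toks : List String) : String :=
  let kept := toks.filter (fun t => t != "</s>")
  let gp := kept.foldl stepB ([], [])
  let groups := gp.1 ++ [gp.2]
  let g0 := groups.headD []
  let rest := groups.tail
  let parts := (PySem.List.enumerate rest 0).map
    (fun p => PySem.Str.join " " (("<segment" ++ PySem.Int.toStr p.1 ++ ">") :: p.2))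
  let parts := if g0.isEmpty then parts else PySem.Str.join " " g0 :: parts
  PySem.Str.join " " parts

-- ===== PRECONDITION & SPEC =====
def Spec_number_segment (toks : List String) (out : String) : Prop := out = number_segment_alt toks
instance (toks : List String) (out : String) : Decidable (Spec_number_segment toks out) := by unfold Spec_number_segment; infer_instance

-- ===== CLAIM (what is proved, stated in full; the proofs are below) =====
def Claim_equal_number_segment : Prop := ∀ (toks : List String), Dom_number_segment toks → Spec_number_segment toks (number_segment toks)

-- ===== LEMMAS AND PROOFS =====

-- current sublist of A, reconstructed from B's split state
def tagB (done : List (List String)) (c : List String) : List String :=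
  match done with
  | [] => c
  | _ :: rest => ("<segment" ++ PySem.Int.toStr (rest.length : Int) ++ ">") :: c

-- outer_list of A, reconstructed from B's finished groups
def partsOf (done : List (List String)) : List String :=
  match done with
  | [] => []
  | g0 :: rest =>
      (if g0.isEmpty then [] else [PySem.Str.join " " g0]) ++
      (PySem.List.enumerate rest 0).map
        (fun p => PySem.Str.join " " (("<segment" ++ PySem.Int.toStr p.1 ++ ">") :: p.2))

theorem foldl_stepA_filter (toks : List String) (st : List String × List String × Int) :
    toks.foldl stepA st = (toks.filter (fun t => t != "</s>")).foldl stepA st := by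
  induction toks generalizing st with
  | nil => rfl
  | cons t ts ih =>
      by_cases h : t = "</s>"
      · subst h
        have hf : ("</s>" != "</s>") = false := by decide
        simp only [List.foldl_cons, List.filter_cons, hf]
        have : stepA st "</s>" = st := by simp [stepA]
        rw [this]; exact ih st
      · have hf : (t != "</s>") = true := by simp [h]
        simp only [List.foldl_cons, List.filter_cons, hf]
        exact ih (stepA st t)

theorem tagB_append (done : List (List String)) (c : List String) (x : String) :
    tagB done (c ++ [x]) = tagB done c ++ [x] := by
  cases done <;> simp [tagB]

theorem inv_fold (l : List String) (done : List (List String)) (cur : List String)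
    (hl : ∀ t ∈ l, t ≠ "</s>") :
    l.foldl stepA (partsOf done, tagB done cur, (done.length : Int)) =
      (fun gp => (partsOf gp.1, tagB gp.1 gp.2, (gp.1.length : Int)))
        (l.foldl stepB (done, cur)) := by
  induction l generalizing done cur with
  | nil => rfl
  | cons t ts ih =>
      have hts : ∀ x ∈ ts, x ≠ "</s>" := fun x hx => hl x (List.mem_cons_of_mem _ hx)
      by_cases hseg : t = "<segment>"
      · subst hseg
        have hA : stepA (partsOf done, tagB done cur, (done.length : Int)) "<segment>" =
            (partsOf (done ++ [cur]), tagB (done ++ [cur]) [], ((done ++ [cur]).length : Int)) := by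
          cases done with
          | nil =>
              simp [stepA, tagB, partsOf]
          | cons g0 rest =>
              simp only [stepA, beq_self_eq_true]
              simp [tagB, partsOf, PySem.List.enumerate_append, PySem.List.enumerate_cons,
                PySem.List.enumerate_nil, List.isEmpty]
        have hB : stepB (done, cur) "<segment>" = (done ++ [cur], []) := by simp [stepB]
        simp only [List.foldl_cons, hA, hB]
        exact ih (done ++ [cur]) [] hts
      · have hs : t ≠ "</s>" := hl t (List.mem_cons_self ..)
        have hA : stepA (partsOf done, tagB done cur, (done.length : Int)) t =
            (partsOf done, tagB done (cur ++ [t]), (done.length : Int)) := by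
          simp [stepA, hseg, hs, tagB_append]
        have hB : stepB (done, cur) t = (done, cur ++ [t]) := by simp [stepB, hseg]
        simp only [List.foldl_cons, hA, hB]
        exact ih done (cur ++ [t]) hts

-- the tail of number_segment_alt after the split, as a function of the split state
def altRender (gp : List (List String) × List String) : String :=
  let groups := gp.1 ++ [gp.2]
  let g0 := groups.headD []
  let rest := groups.tail
  let parts := (PySem.List.enumerate rest 0).map
    (fun p => PySem.Str.join " " (("<segment" ++ PySem.Int.toStr p.1 ++ ">") :: p.2))
  let parts := if g0.isEmpty then parts else PySem.Str.join " " g0 :: parts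
  PySem.Str.join " " parts

theorem final_case (done : List (List String)) (cur : List String) :
    PySem.Str.join " " (partsOf done ++ [PySem.Str.join " " (tagB done cur)]) =
      altRender (done, cur) := by
  cases done with
  | nil =>
      cases cur with
      | nil => decide
      | cons c cs => simp [partsOf, tagB, altRender]
  | cons g0 rest =>
      simp only [partsOf, tagB, altRender, List.cons_append, List.headD, List.tail,
        PySem.List.enumerate_append, List.map_append]
      by_cases hg0 : g0.isEmpty = true <;>
        simp [hg0, PySem.List.enumerate_cons, PySem.List.enumerate_nil]

theorem number_segment_eq_alt (toks : List String) :
    number_segment toks = number_segment_alt toks := by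
  unfold number_segment number_segment_alt
  rw [foldl_stepA_filter]
  have h0 : (([], [], 0) : List String × List String × Int) =
      (partsOf [], tagB [] [], (([] : List (List String)).length : Int)) := by
    simp [partsOf, tagB]
  rw [h0, inv_fold _ [] [] (by intro t ht; simpa using (List.mem_filter.mp ht).2)]
  exact final_case ((toks.filter (fun t => t != "</s>")).foldl stepB ([], [])).1
    ((toks.filter (fun t => t != "</s>")).foldl stepB ([], [])).2

-- ===== VERDICT (by name: the statement is the Claim_ definition above) =====
theorem number_segment_spec : Claim_equal_number_segment := by
  intro toks _
  exact number_segment_eq_alt toks
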